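-- pv_equiv track=rewrite | github.com/theFinalFlex/peter-griffin-cybersecurity | process_transcript.py | split_into_stories
-- ===== SOURCE A (Python) =====
-- def split_into_stories(text):
--     # Split text into stories based on key phrases that indicate new topics
--     story_markers = [
--         "And Google released",
--         "Now earlier this week",
--         "And ESET is reporting",
--     ]
--
--     stories = []
--     current_story = text
--
--     for marker in story_markers:
--         if marker in current_story:
--             parts = current_story.split(marker, 1)
--             if parts[0].strip():
--                 stories.append(parts[0].strip())
--             current_story = marker + parts[1]
--
--     if current_story.strip():
--         stories.append(current_story.strip())
--
--     return stories
-- ===== SOURCE B (Python) =====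
-- def split_into_stories(text):
--     # Two-pass: compute absolute cut positions first, then slice, strip and filter.
--     story_markers = [
--         "And Google released",
--         "Now earlier this week",
--         "And ESET is reporting",
--     ]
--
--     cuts = [0]
--     for marker in story_markers:
--         pos = text.find(marker, cuts[-1])
--         if pos != -1:
--             cuts.append(pos)
--
--     segments = [text[a:b] for a, b in zip(cuts, cuts[1:])]
--     segments.append(text[cuts[-1]:])
--
--     return [seg.strip() for seg in segments if seg.strip()]
-- ===== Notes on version B (the rewrite author's own statement) =====
-- stated objective: alternative
-- what changed: B computes all absolute cut positions first with text.find(marker, last_cut) in one pass, then slices, strips and filters the segments in a second pass, instead of A's repeated split(marker,1) and rebuilding of current_story.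
import Mathlib
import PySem

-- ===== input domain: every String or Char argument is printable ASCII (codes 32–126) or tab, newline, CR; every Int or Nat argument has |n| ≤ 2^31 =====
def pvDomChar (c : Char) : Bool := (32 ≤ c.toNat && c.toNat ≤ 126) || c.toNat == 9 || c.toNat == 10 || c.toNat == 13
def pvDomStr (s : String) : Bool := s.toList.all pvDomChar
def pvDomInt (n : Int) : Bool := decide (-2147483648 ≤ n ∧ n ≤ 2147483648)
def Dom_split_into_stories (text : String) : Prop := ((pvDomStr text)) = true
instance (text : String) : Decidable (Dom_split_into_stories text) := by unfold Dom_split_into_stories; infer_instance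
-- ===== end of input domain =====

-- B computes the cut positions in one pass (text.find from the previous cut) and slices/strips
-- the segments in a second pass, instead of A's repeated split-and-rebuild of current_story.


-- the three fixed marker phrases (shared constant of both programs)
def pvMarkers : List (List Char) :=
  ["And Google released".toList, "Now earlier this week".toList, "And ESET is reporting".toList]

-- ===== PORT A =====
-- one iteration of A's 'for marker in story_markers' loop; state = (stories, current_story)
def pvStepA (st : List (List Char) × List Char) (marker : List Char) : List (List Char) × List Char :=
  if PySem.Chars.isIn marker st.2 then
    let parts := PySem.Chars.splitOnMax st.2 marker 1   -- current_story.split(marker, 1)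
    let stories :=
      if PySem.Chars.strip (parts.getD 0 []) ≠ [] then st.1 ++ [PySem.Chars.strip (parts.getD 0 [])]
      else st.1
    (stories, marker ++ parts.getD 1 [])
  else st

def split_into_stories (text : String) : List String :=
  let st := pvMarkers.foldl pvStepA ([], text.toList)
  let stories :=
    if PySem.Chars.strip st.2 ≠ [] then st.1 ++ [PySem.Chars.strip st.2] else st.1
  stories.map String.mk

-- ===== PORT B =====
-- one iteration of B's cut-collecting loop; cuts is never empty (starts as [0]), so
-- Python's cuts[-1] is its last element, ported as getLastD 0
def pvStepB (t : List Char) (cuts : List Int) (marker : List Char) : List Int :=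
  let pos := PySem.Chars.findFrom t marker (cuts.getLastD 0)    -- text.find(marker, cuts[-1])
  if pos ≠ -1 then cuts ++ [pos] else cuts

def split_into_stories_alt (text : String) : List String :=
  let t := text.toList
  let cuts := pvMarkers.foldl (pvStepB t) [0]
  let segments :=
    (cuts.zip cuts.tail).map (fun ab => PySem.List.slice t (some ab.1) (some ab.2))
      ++ [PySem.List.slice t (some (cuts.getLastD 0))]
  segments.filterMap (fun seg =>
    if PySem.Chars.strip seg ≠ [] then some (String.mk (PySem.Chars.strip seg)) else none)

-- ===== PRECONDITION & SPEC =====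
def Spec_split_into_stories (text : String) (out : List String) : Prop := out = split_into_stories_alt text
instance (text : String) (out : List String) : Decidable (Spec_split_into_stories text out) := by unfold Spec_split_into_stories; infer_instance

-- ===== CLAIM (what is proved, stated in full; the proofs are below) =====
def Claim_equal_split_into_stories : Prop := ∀ (text : String), Dom_split_into_stories text → Spec_split_into_stories text (split_into_stories text)

-- ===== LEMMAS AND PROOFS =====

-- the common segmentation both programs compute: cut the current tail at the first
-- occurrence of each marker in turn
def pvSegs : List (List Char) → List Char → List (List Char)
  | [], cur => [cur]
  | m :: ms, cur =>
    if PySem.Chars.isIn m cur then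
      cur.take (PySem.Chars.find cur m).toNat
        :: pvSegs ms (cur.drop (PySem.Chars.find cur m).toNat)
    else pvSegs ms cur

-- strip every segment, keep the non-empty ones
def pvFilterStrips (xs : List (List Char)) : List (List Char) :=
  xs.filterMap (fun s => if PySem.Chars.strip s ≠ [] then some (PySem.Chars.strip s) else none)

-- absolute cut positions of the segmentation, searching text t from offset k
def pvCuts (t : List Char) : List (List Char) → Nat → List Nat
  | [], _ => []
  | m :: ms, k =>
    if PySem.Chars.isIn m (t.drop k) then
      (k + (PySem.Chars.find (t.drop k) m).toNat)
        :: pvCuts t ms (k + (PySem.Chars.find (t.drop k) m).toNat)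
    else pvCuts t ms k

-- `s.split(sep, 1)` when sep occurs: the piece before the first occurrence and the rest after it
lemma pvGo_zero (sep : List Char) (fuel : Nat) (l : List Char) (acc : List (List Char)) :
    PySem.Chars.splitOnMax.go sep fuel 0 l [] acc = (l :: acc).reverse := by
  cases fuel <;> cases l <;> simp [PySem.Chars.splitOnMax.go]

lemma pvGo_one (sep : List Char) (hsep : sep ≠ []) :
    ∀ (fuel : Nat) (l : List Char) (i : Nat) (cur : List Char) (acc : List (List Char)),
      l.length ≤ fuel → sep <+: l.drop i → (∀ j < i, ¬ sep <+: l.drop j) →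
      PySem.Chars.splitOnMax.go sep fuel 1 l cur acc
        = acc.reverse ++ [cur.reverse ++ l.take i, l.drop (i + sep.length)] := by
  intro fuel
  induction fuel with
  | zero =>
    intro l i cur acc hlen hpre _hmin
    have hl : l = [] := List.eq_nil_of_length_eq_zero (Nat.le_zero.mp hlen)
    subst hl
    simp at hpre
    exact absurd hpre hsep
  | succ f ih =>
    intro l i cur acc hlen hpre hmin
    cases l with
    | nil =>
      simp at hpre
      exact absurd hpre hsep
    | cons c rest =>
      rw [PySem.Chars.splitOnMax.go.eq_def]
      simp only []
      by_cases hp : sep.isPrefixOf (c :: rest) = true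
      · have hp' : sep <+: (c :: rest) := List.isPrefixOf_iff_prefix.mp hp
        have hi : i = 0 := by
          by_contra h0
          exact hmin 0 (Nat.pos_of_ne_zero h0) (by simpa using hp')
        subst hi
        simp only [hp, if_pos]
        rw [pvGo_zero]
        simp
      · have hi : i ≠ 0 := by
          intro h0; subst h0
          exact hp (List.isPrefixOf_iff_prefix.mpr (by simpa using hpre))
        obtain ⟨i', rfl⟩ := Nat.exists_eq_succ_of_ne_zero hi
        have := ih rest i' (c :: cur) acc (by simpa using hlen)
          (by simpa [List.drop_succ_cons] using hpre)
          (fun j hj => by simpa [List.drop_succ_cons] using hmin (j+1) (by omega))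
        simp only [hp]
        rw [if_neg (by simp), this]
        simp [List.take_succ_cons, Nat.succ_add]

lemma pvSplitOnMax_one (s sep : List Char) (hsep : sep ≠ [])
    (h : PySem.Chars.isIn sep s = true) :
    PySem.Chars.splitOnMax s sep 1
      = [s.take (PySem.Chars.find s sep).toNat,
         s.drop ((PySem.Chars.find s sep).toNat + sep.length)] := by
  have hnn : 0 ≤ PySem.Chars.find s sep :=
    (PySem.Chars.find_nonneg_iff s sep).mpr ((PySem.Chars.isIn_iff_infix sep s).mp h)
  obtain ⟨hpre, hmin⟩ := PySem.Chars.find_spec hnn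
  rw [PySem.Chars.splitOnMax]
  rw [if_neg (by norm_num)]
  norm_num
  rw [pvGo_one sep hsep (s.length + 1) s _ [] [] (by omega) hpre hmin]
  simp

-- A's loop followed by the final strip-append equals filtering the segmentation
lemma pvLoopA (ms : List (List Char)) (hne : ∀ m ∈ ms, m ≠ []) :
    ∀ (cur : List Char) (acc : List (List Char)),
      (let st := ms.foldl pvStepA (acc, cur);
       if PySem.Chars.strip st.2 ≠ [] then st.1 ++ [PySem.Chars.strip st.2] else st.1)
        = acc ++ pvFilterStrips (pvSegs ms cur) := by
  induction ms with
  | nil =>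
    intro cur acc
    simp only [List.foldl_nil, pvSegs, pvFilterStrips, List.filterMap]
    split_ifs with h <;> simp
  | cons m ms ih =>
    intro cur acc
    have hm : m ≠ [] := hne m (by simp)
    have hne' : ∀ x ∈ ms, x ≠ [] := fun x hx => hne x (by simp [hx])
    simp only [List.foldl_cons, pvSegs]
    by_cases h : PySem.Chars.isIn m cur = true
    · set i := (PySem.Chars.find cur m).toNat with hi
      have hsplit := pvSplitOnMax_one cur m hm h
      have hnn : 0 ≤ PySem.Chars.find cur m :=
        (PySem.Chars.find_nonneg_iff cur m).mpr ((PySem.Chars.isIn_iff_infix m cur).mp h)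
      have hpre : m <+: cur.drop i := (PySem.Chars.find_spec hnn).1
      obtain ⟨t0, ht0⟩ := hpre
      have hdrop : cur.drop (i + m.length) = t0 := by
        have h2 : (cur.drop i).drop m.length = t0 := by rw [← ht0]; simp
        rw [List.drop_drop] at h2
        exact h2
      have hstep : pvStepA (acc, cur) m
          = ((if PySem.Chars.strip (cur.take i) ≠ [] then acc ++ [PySem.Chars.strip (cur.take i)] else acc),
             cur.drop i) := by
        simp only [pvStepA, h, if_pos, hsplit]
        simp only [List.getD, List.getElem?_cons_zero, List.getElem?_cons_succ, Option.getD_some, ← hi]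
        rw [hdrop, ht0]
      rw [hstep, ih hne']
      simp only [h, if_pos, pvFilterStrips, List.filterMap_cons]
      split_ifs with hs <;> simp
    · have hstep : pvStepA (acc, cur) m = (acc, cur) := by simp [pvStepA, h]
      rw [hstep, ih hne']
      simp [h]

-- B's cut loop computes [start] ++ pvCuts
lemma pvLoopB (t : List Char) (ms : List (List Char)) :
    ∀ (k : Nat) (pcs : List Int), k ≤ t.length → pcs.getLastD 0 = (k : Int) →
      ms.foldl (pvStepB t) pcs = pcs ++ (pvCuts t ms k).map Int.ofNat := by
  induction ms with
  | nil => intro k pcs _ _; simp [pvCuts]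
  | cons m ms ih =>
    intro k pcs hk hlast
    simp only [List.foldl_cons, pvCuts]
    have hff := PySem.Chars.findFrom_natCast t m k hk
    by_cases h : PySem.Chars.isIn m (t.drop k) = true
    · have hinf := (PySem.Chars.isIn_iff_infix m (t.drop k)).mp h
      have hnn : 0 ≤ PySem.Chars.find (t.drop k) m :=
        (PySem.Chars.find_nonneg_iff _ m).mpr hinf
      have hfne : PySem.Chars.find (t.drop k) m ≠ -1 := by omega
      set i := (PySem.Chars.find (t.drop k) m).toNat with hidef
      have hpos : PySem.Chars.findFrom t m (k : Int) = ((k + i : Nat) : Int) := by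
        rw [hff, if_neg hfne]; omega
      have hstep : pvStepB t pcs m = pcs ++ [((k + i : Nat) : Int)] := by
        simp only [pvStepB, hlast, hpos]
        rw [if_pos (by push_cast; omega)]
      have hkle : k + i ≤ t.length := by
        have h1 := PySem.Chars.find_le_length (t.drop k) m
        have h2 : (t.drop k).length = t.length - k := by simp
        omega
      have hlast' : (pcs ++ [((k + i : Nat) : Int)]).getLastD 0 = ((k + i : Nat) : Int) := by
        simp
      rw [hstep, if_pos h, ih (k + i) _ hkle hlast']
      simp [Int.ofNat_eq_natCast]
    · have hninf : ¬ m <:+: t.drop k := fun hc => h ((PySem.Chars.isIn_iff_infix _ _).mpr hc)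
      have hfe : PySem.Chars.find (t.drop k) m = -1 := by
        have := PySem.Chars.neg_one_le_find (t.drop k) m
        rcases lt_or_eq_of_le this with h1 | h1
        · exact absurd ((PySem.Chars.find_nonneg_iff _ _).mp (by omega)) hninf
        · omega
      have hstep : pvStepB t pcs m = pcs := by
        simp only [pvStepB, hlast, hff, hfe]
        simp
      rw [hstep, if_neg (by simp [h]), ih k pcs hk hlast]

-- the segmentation of the tail t.drop k is the list of slices between consecutive cuts
lemma pvSegs_eq_slices (t : List Char) (ms : List (List Char)) :
    ∀ (k : Nat), k ≤ t.length →
      pvSegs ms (t.drop k)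
        = ((k :: pvCuts t ms k).zip (pvCuts t ms k)).map
            (fun ab => (t.drop ab.1).take (ab.2 - ab.1))
          ++ [t.drop ((pvCuts t ms k).getLastD k)] := by
  induction ms with
  | nil => intro k _; simp [pvSegs, pvCuts]
  | cons m ms ih =>
    intro k hk
    simp only [pvSegs, pvCuts]
    by_cases h : PySem.Chars.isIn m (t.drop k) = true
    · set i := (PySem.Chars.find (t.drop k) m).toNat with hidef
      have hkle : k + i ≤ t.length := by
        have h1 := PySem.Chars.find_le_length (t.drop k) m
        have h2 : (t.drop k).length = t.length - k := by simp
        have hnn : 0 ≤ PySem.Chars.find (t.drop k) m :=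
          (PySem.Chars.find_nonneg_iff _ m).mpr ((PySem.Chars.isIn_iff_infix m _).mp h)
        omega
      have hdd : (t.drop k).drop i = t.drop (k + i) := by
        rw [List.drop_drop]
      rw [if_pos h, if_pos h, hdd, ih (k + i) hkle]
      simp only [List.zip_cons_cons, List.map_cons, List.getLastD_cons]
      congr 2
      simp [hidef]
    · rw [if_neg h, if_neg h, ih k hk]

-- ===== VERDICT (by name: the statement is the Claim_ definition above) =====
theorem split_into_stories_spec : Claim_equal_split_into_stories := by
  intro text _
  simp only [Spec_split_into_stories, split_into_stories, split_into_stories_alt]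
  set t := text.toList with ht
  have hne : ∀ m ∈ pvMarkers, m ≠ [] := by decide
  have hA := pvLoopA pvMarkers hne t []
  simp only [List.nil_append] at hA
  rw [hA]
  have hB := pvLoopB t pvMarkers 0 [0] (by omega) (by simp)
  set cs := pvCuts t pvMarkers 0 with hcs
  have hcuts : pvMarkers.foldl (pvStepB t) [0] = ((0 :: cs).map Int.ofNat) := by
    rw [hB]; simp
  rw [hcuts]
  have hsegs := pvSegs_eq_slices t pvMarkers 0 (by omega)
  simp only [List.drop_zero] at hsegs
  rw [hsegs]
  have htail : ((0 :: cs).map Int.ofNat).tail = cs.map Int.ofNat := by simp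
  rw [htail]
  have hzip : ((0 :: cs).map Int.ofNat).zip (cs.map Int.ofNat)
      = ((0 :: cs).zip cs).map (Prod.map Int.ofNat Int.ofNat) := List.zip_map
  rw [hzip, List.map_map]
  have hslice : ∀ ab : Nat × Nat,
      PySem.List.slice t (some (Int.ofNat ab.1)) (some (Int.ofNat ab.2))
        = (t.drop ab.1).take (ab.2 - ab.1) := by
    intro ab
    have := PySem.List.slice_natCast t ab.1 ab.2
    simpa [Int.ofNat_eq_natCast] using this
  have hlastc : ((0 :: cs).map Int.ofNat).getLastD 0 = Int.ofNat (cs.getLastD 0) := by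
    simp only [List.map_cons, List.getLastD_cons]
    simpa using List.getLastD_map (f := Int.ofNat) (l := cs) (a := 0)
  have hlastslice : PySem.List.slice t (some (((0 :: cs).map Int.ofNat).getLastD 0))
      = t.drop (cs.getLastD 0) := by
    rw [hlastc, PySem.List.slice_from t (a := Int.ofNat (cs.getLastD 0)) (by simp [Int.ofNat_eq_natCast])]
    simp [Int.ofNat_eq_natCast]
  rw [hlastslice]
  simp only [List.map_append, List.map_filterMap, List.filterMap_append, List.filterMap_map,
    pvFilterStrips]
  congr 1
  · apply List.filterMap_congr
    intro ab _
    simp only [Function.comp_apply, Prod.map]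
    rw [hslice ab]
    split_ifs <;> simp
  · simp only [List.filterMap_cons, List.filterMap_nil]
    split_ifs <;> simp [hcs]
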